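-- pv_equiv track=rewrite | github.com/aditya1331/Code-Library | Maximum Length Snake Sequence.py | findMaxLengthSnakeSequence
-- ===== SOURCE A (Python) =====
-- def constructPath(L, grid, tail):
--     (i, j) = tail
--     path = [tail]
--
--     # start from snake's tail till snake's head
--     while L[i][j]:
--         if i - 1 >= 0 and L[i][j] - L[i - 1][j] == 1 and \
--                 abs(grid[i - 1][j] - grid[i][j]) == 1:
--             path.append((i - 1, j))
--             i = i - 1
--         elif j - 1 >= 0 and L[i][j] - L[i][j - 1] == 1 and \
--                 abs(grid[i][j - 1] - grid[i][j]) == 1: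
--             path.append((i, j - 1))
--             j = j - 1
--
--     return path
--
-- def findMaxLengthSnakeSequence(grid):
--     # base case
--     if not grid or not len(grid):
--         return
--
--     # `L[i][j]` stores the maximum length of the snake sequence
--     # ending at cell (i, j)
--     L = [[0 for x in range(len(grid))] for y in range(len(grid))]
--
--     # stores the maximum length of the snake sequence
--     max_so_far = 0
--
--     # Pair to store coordinates of a snake's tail
--     tail = None
--
--     # process the matrix in a bottom-up fashion
--     for i in range(len(grid)):
--         for j in range(len(grid)):
--             # compare the current cell with the top cell and check the
--             # absolute difference
--             if i - 1 >= 0 and abs(grid[i - 1][j] - grid[i][j]) == 1: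
--                 L[i][j] = L[i - 1][j] + 1
--                 if max_so_far < L[i][j]:
--                     max_so_far = L[i][j]
--                     tail = (i, j)
--
--             # compare the current cell with the left cell and check the
--             # absolute difference
--             if j - 1 >= 0 and abs(grid[i][j - 1] - grid[i][j]) == 1:
--                 # `L[i][j]` can be non-zero at this point, hence take the maximum
--                 L[i][j] = max(L[i][j], L[i][j - 1] + 1)
--                 if max_so_far < L[i][j]:
--                     max_so_far = L[i][j]
--                     tail = (i, j)
--
--     # construct the maximum length snake sequence
--     return constructPath(L, grid, tail)
-- ===== SOURCE B (Python) =====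
-- def findMaxLengthSnakeSequence(grid):
--     # top-down memoized DP + global argmax scan + greedy walk, instead of
--     # A's bottom-up table with inline max/tail tracking
--     if not grid:
--         return None
--
--     n = len(grid)
--     memo = {}
--
--     def L(i, j):
--         if (i, j) not in memo:
--             best = 0
--             if i > 0 and abs(grid[i - 1][j] - grid[i][j]) == 1:
--                 best = L(i - 1, j) + 1
--             if j > 0 and abs(grid[i][j - 1] - grid[i][j]) == 1:
--                 best = max(best, L(i, j - 1) + 1)
--             memo[(i, j)] = best
--         return memo[(i, j)]
--
--     best = max(L(i, j) for i in range(n) for j in range(n))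
--     i, j = next((i, j) for i in range(n) for j in range(n) if L(i, j) == best)
--
--     path = []
--     while True:
--         path.append((i, j))
--         if i > 0 and L(i, j) - L(i - 1, j) == 1 and abs(grid[i - 1][j] - grid[i][j]) == 1:
--             i -= 1
--         elif j > 0 and L(i, j) - L(i, j - 1) == 1 and abs(grid[i][j - 1] - grid[i][j]) == 1:
--             j -= 1
--         else:
--             break
--     return path
-- ===== Notes on version B (the rewrite author's own statement) =====
-- stated objective: alternative
-- what changed: Replaces the bottom-up DP table with inline running max/tail tracking by a top-down memoized recursion for the snake length, a separate global max + first-argmax scan to find the tail, and a greedy walk that follows a predecessor until none exists instead of A's while-L-nonzero loop.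
import Mathlib
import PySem

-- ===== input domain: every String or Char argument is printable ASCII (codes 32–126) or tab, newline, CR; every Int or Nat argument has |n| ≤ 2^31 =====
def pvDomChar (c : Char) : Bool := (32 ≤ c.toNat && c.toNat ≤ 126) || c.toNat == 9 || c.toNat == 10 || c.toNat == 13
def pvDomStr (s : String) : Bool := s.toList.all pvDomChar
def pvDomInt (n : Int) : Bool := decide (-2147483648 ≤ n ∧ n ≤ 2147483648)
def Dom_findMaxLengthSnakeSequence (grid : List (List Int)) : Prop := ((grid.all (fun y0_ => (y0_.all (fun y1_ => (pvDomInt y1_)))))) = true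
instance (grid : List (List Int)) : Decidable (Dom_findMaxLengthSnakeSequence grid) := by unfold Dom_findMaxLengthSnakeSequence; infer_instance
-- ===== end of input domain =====

-- B replaces A's bottom-up DP table with inline max/tail tracking by a top-down memoized
-- recursion for snake lengths, a global max + first-argmax scan for the tail, and a greedy
-- predecessor walk; same O(n^2) cost, different decomposition.


-- ===== PORT A =====
-- 2-D read/write helpers for the list-of-lists table (indices produced by the loops are
-- in range under Pre_, so the getD default is never the value returned)
def pvG2 (L : List (List Int)) (i j : Nat) : Int := (L.getD i []).getD j 0
def pvS2 (L : List (List Int)) (i j : Nat) (v : Int) : List (List Int) :=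
  L.set i ((L.getD i []).set j v)

-- body of A's double loop: the two conditional updates of L with max/tail tracking
def pvCellA (grid : List (List Int)) (σ : List (List Int) × Int × Option (Nat × Nat))
    (i j : Nat) : List (List Int) × Int × Option (Nat × Nat) :=
  let σ1 :=
    if 1 ≤ i ∧ (pvG2 grid (i-1) j - pvG2 grid i j).natAbs = 1 then
      let L := pvS2 σ.1 i j (pvG2 σ.1 (i-1) j + 1)
      if σ.2.1 < pvG2 L i j then (L, pvG2 L i j, some (i, j)) else (L, σ.2.1, σ.2.2)
    else σ
  if 1 ≤ j ∧ (pvG2 grid i (j-1) - pvG2 grid i j).natAbs = 1 then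
    let L := pvS2 σ1.1 i j (max (pvG2 σ1.1 i j) (pvG2 σ1.1 i (j-1) + 1))
    if σ1.2.1 < pvG2 L i j then (L, pvG2 L i j, some (i, j)) else (L, σ1.2.1, σ1.2.2)
  else σ1

-- constructPath's while loop; fuel = the table value at the tail, which counts the
-- remaining iterations exactly (if neither branch fires Python diverges; we return path)
def pvWalkA (grid L : List (List Int)) : Nat → Nat → Nat → List (Int × Int) → List (Int × Int)
  | 0, _, _, path => path
  | f+1, i, j, path =>
    if pvG2 L i j ≠ 0 then
      if 1 ≤ i ∧ pvG2 L i j - pvG2 L (i-1) j = 1 ∧ (pvG2 grid (i-1) j - pvG2 grid i j).natAbs = 1 then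
        pvWalkA grid L f (i-1) j (path ++ [(((i-1 : Nat) : Int), (j : Int))])
      else if 1 ≤ j ∧ pvG2 L i j - pvG2 L i (j-1) = 1 ∧ (pvG2 grid i (j-1) - pvG2 grid i j).natAbs = 1 then
        pvWalkA grid L f i (j-1) (path ++ [((i : Int), ((j-1 : Nat) : Int))])
      else path
    else path

def findMaxLengthSnakeSequence (grid : List (List Int)) : Option (List (Int × Int)) :=
  if grid = [] then none else
  let n := grid.length
  let L0 : List (List Int) := (List.range n).map (fun _ => (List.range n).map (fun _ => (0:Int)))
  let s := (List.range n).foldl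
    (fun σ i => (List.range n).foldl (fun σ j => pvCellA grid σ i j) σ) (L0, 0, none)
  match s.2.2 with
  | none => none  -- tail is None: Python raises TypeError; excluded by Pre_
  | some (ti, tj) =>
      some (pvWalkA grid s.1 (pvG2 s.1 ti tj).toNat ti tj [((ti : Int), (tj : Int))])

-- ===== PORT B =====
-- top-down memoized recursion L(i, j) of Source B (memoization is evaluation bookkeeping);
-- the recursion descends in i + j, encoded with the structurally decreasing fuel i + j
-- so the definition stays kernel-reducible (fuel 0 forces i = j = 0, where L(0,0) = 0)
def lenAux (grid : List (List Int)) : Nat → Nat → Nat → Int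
  | 0, _, _ => 0
  | f+1, i, j =>
    let b1 := if 1 ≤ i ∧ (pvG2 grid (i-1) j - pvG2 grid i j).natAbs = 1
              then lenAux grid f (i-1) j + 1 else 0
    if 1 ≤ j ∧ (pvG2 grid i (j-1) - pvG2 grid i j).natAbs = 1
    then max b1 (lenAux grid f i (j-1) + 1) else b1

def lenSnake (grid : List (List Int)) (i j : Nat) : Int := lenAux grid (i + j) i j

-- Source B's walk loop: append the cell, follow a predecessor or break; fuel = L at the cell
def pvWalkB (grid : List (List Int)) : Nat → Nat → Nat → List (Int × Int)
  | 0, i, j => [((i : Int), (j : Int))]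
  | f+1, i, j =>
    ((i : Int), (j : Int)) ::
      (if 1 ≤ i ∧ lenSnake grid i j - lenSnake grid (i-1) j = 1 ∧ (pvG2 grid (i-1) j - pvG2 grid i j).natAbs = 1 then
        pvWalkB grid f (i-1) j
      else if 1 ≤ j ∧ lenSnake grid i j - lenSnake grid i (j-1) = 1 ∧ (pvG2 grid i (j-1) - pvG2 grid i j).natAbs = 1 then
        pvWalkB grid f i (j-1)
      else [])

def findMaxLengthSnakeSequence_alt (grid : List (List Int)) : Option (List (Int × Int)) :=
  if grid = [] then none else
  let n := grid.length
  let cells := (List.range n).flatMap (fun i => (List.range n).map (fun j => (i, j)))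
  match PySem.List.max? (cells.map (fun p => lenSnake grid p.1 p.2)) (fun v => v) with
  | none => none  -- unreachable: cells nonempty since grid ≠ []
  | some best =>
    match cells.find? (fun p => lenSnake grid p.1 p.2 == best) with
    | none => none  -- unreachable: best is attained
    | some (ti, tj) => some (pvWalkB grid (lenSnake grid ti tj).toNat ti tj)

-- ===== PRECONDITION & SPEC =====
-- Pre_ excludes exactly the inputs where A raises: a row shorter than the grid height
-- (IndexError in the scan, which reads all cells grid[i][j] with i,j < len(grid) when
-- len(grid) ≥ 2), and non-empty grids with no adjacent |difference|=1 pair among those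
-- cells (tail stays None; constructPath's unpacking raises TypeError).
def Pre_findMaxLengthSnakeSequence (grid : List (List Int)) : Prop :=
  (∀ r ∈ grid, grid.length ≤ r.length) ∧
  (grid ≠ [] → ∃ i < grid.length, ∃ j < grid.length,
      (1 ≤ i ∧ (pvG2 grid (i-1) j - pvG2 grid i j).natAbs = 1) ∨
      (1 ≤ j ∧ (pvG2 grid i (j-1) - pvG2 grid i j).natAbs = 1))
instance (grid : List (List Int)) : Decidable (Pre_findMaxLengthSnakeSequence grid) := by
  unfold Pre_findMaxLengthSnakeSequence; infer_instance

def pvWitness_findMaxLengthSnakeSequence : List (List Int) := [[1, 2], [4, 3]]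

def Spec_findMaxLengthSnakeSequence (grid : List (List Int)) (out : Option (List (Int × Int))) : Prop :=
  out = findMaxLengthSnakeSequence_alt grid
instance (grid : List (List Int)) (out : Option (List (Int × Int))) : Decidable (Spec_findMaxLengthSnakeSequence grid out) := by
  unfold Spec_findMaxLengthSnakeSequence; infer_instance

-- ===== CLAIM (what is proved, stated in full; the proofs are below) =====
def Claim_equal_findMaxLengthSnakeSequence : Prop :=
  ∀ (grid : List (List Int)), Dom_findMaxLengthSnakeSequence grid →
    Pre_findMaxLengthSnakeSequence grid →
    Spec_findMaxLengthSnakeSequence grid (findMaxLengthSnakeSequence grid)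

-- ===== LEMMAS AND PROOFS =====

theorem lenAux_stable (grid : List (List Int)) :
    ∀ f f' i j, i + j ≤ f → i + j ≤ f' → lenAux grid f i j = lenAux grid f' i j := by
  intro f
  induction f with
  | zero =>
    intro f' i j h h'
    have hi : i = 0 := by omega
    have hj : j = 0 := by omega
    subst hi hj
    cases f' <;> simp [lenAux]
  | succ f ih =>
    intro f' i j h h'
    cases f' with
    | zero =>
      have hi : i = 0 := by omega
      have hj : j = 0 := by omega
      subst hi hj
      simp [lenAux]
    | succ g =>
      simp only [lenAux]
      by_cases h1 : 1 ≤ i ∧ (pvG2 grid (i-1) j - pvG2 grid i j).natAbs = 1 <;>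
        by_cases h2 : 1 ≤ j ∧ (pvG2 grid i (j-1) - pvG2 grid i j).natAbs = 1 <;>
          simp only [h1, h2, if_pos, if_neg, not_false_iff, if_true] <;>
            first
            | rfl
            | (try rw [ih g (i-1) j (by omega) (by omega)]
               try rw [ih g i (j-1) (by omega) (by omega)])

theorem lenSnake_eq (grid : List (List Int)) (i j : Nat) :
    lenSnake grid i j =
      (let b1 := if 1 ≤ i ∧ (pvG2 grid (i-1) j - pvG2 grid i j).natAbs = 1
                 then lenSnake grid (i-1) j + 1 else 0
       if 1 ≤ j ∧ (pvG2 grid i (j-1) - pvG2 grid i j).natAbs = 1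
       then max b1 (lenSnake grid i (j-1) + 1) else b1) := by
  unfold lenSnake
  rcases hs : i + j with _ | f
  · have hi : i = 0 := by omega
    have hj : j = 0 := by omega
    subst hi hj
    simp [lenAux]
  · simp only [lenAux]
    by_cases h1 : 1 ≤ i ∧ (pvG2 grid (i-1) j - pvG2 grid i j).natAbs = 1 <;>
      by_cases h2 : 1 ≤ j ∧ (pvG2 grid i (j-1) - pvG2 grid i j).natAbs = 1 <;>
        simp only [h1, h2, if_neg, not_false_iff] <;>
          first
          | rfl
          | (try rw [lenAux_stable grid f ((i-1) + j) (i-1) j (by omega) (by omega)]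
             try rw [lenAux_stable grid f (i + (j-1)) i (j-1) (by omega) (by omega)])

theorem lenAux_nonneg (grid : List (List Int)) :
    ∀ f i j, 0 ≤ lenAux grid f i j := by
  intro f
  induction f with
  | zero => intro i j; simp [lenAux]
  | succ f ih =>
    intro i j
    have h1 := ih (i-1) j
    have h2 := ih i (j-1)
    simp only [lenAux]
    (try split_ifs) <;> simp <;> omega

theorem lenSnake_nonneg (grid : List (List Int)) (i j : Nat) : 0 ≤ lenSnake grid i j :=
  lenAux_nonneg grid (i + j) i j

def lenP (grid : List (List Int)) (p : Nat × Nat) : Int := lenSnake grid p.1 p.2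

def MD (grid : List (List Int)) (done : List (Nat × Nat)) : Int :=
  (done.map (lenP grid)).foldl max 0

def TD (grid : List (List Int)) (done : List (Nat × Nat)) : Option (Nat × Nat) :=
  if MD grid done = 0 then none else done.find? (fun p => lenP grid p == MD grid done)

def TBL (grid : List (List Int)) (done : List (Nat × Nat)) : List (List Int) :=
  (List.range grid.length).map (fun i =>
    (List.range grid.length).map (fun j => if (i, j) ∈ done then lenP grid (i, j) else 0))

theorem TBL_length (grid : List (List Int)) (done : List (Nat × Nat)) :
    (TBL grid done).length = grid.length := by simp [TBL]

theorem TBL_row (grid : List (List Int)) (done : List (Nat × Nat)) {i : Nat}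
    (hi : i < grid.length) :
    (TBL grid done).getD i [] =
      (List.range grid.length).map (fun j => if (i, j) ∈ done then lenP grid (i, j) else 0) := by
  simp [TBL, List.getD_eq_getElem?_getD, hi]

theorem pvG2_TBL (grid : List (List Int)) (done : List (Nat × Nat)) {i j : Nat}
    (hi : i < grid.length) (hj : j < grid.length) :
    pvG2 (TBL grid done) i j = if (i, j) ∈ done then lenP grid (i, j) else 0 := by
  unfold pvG2
  rw [TBL_row grid done hi]
  simp [List.getD_eq_getElem?_getD, hj]

theorem pvG2_pvS2_self (L : List (List Int)) {i j : Nat} (v : Int)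
    (hi : i < L.length) (hj : j < (L.getD i []).length) :
    pvG2 (pvS2 L i j v) i j = v := by
  have hj' : j < L[i].length := by
    simpa [List.getD_eq_getElem?_getD, hi] using hj
  simp [pvG2, pvS2, List.getD_eq_getElem?_getD, List.getElem?_set, hi, hj']

theorem pvG2_pvS2_ne (L : List (List Int)) {i j i' j' : Nat} (v : Int)
    (h : (i', j') ≠ (i, j)) :
    pvG2 (pvS2 L i j v) i' j' = pvG2 L i' j' := by
  by_cases hii : i' = i
  · subst hii
    have hjj : j' ≠ j := by simpa [Prod.ext_iff] using h
    by_cases hlen : i' < L.length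
    · simp [pvG2, pvS2, List.getD_eq_getElem?_getD, List.getElem?_set, (show j ≠ j' from Ne.symm hjj), hlen]
    · simp [pvG2, pvS2, List.getD_eq_getElem?_getD, List.getElem?_set, hlen]
  · simp [pvG2, pvS2, List.getD_eq_getElem?_getD, List.getElem?_set,
      (show i ≠ i' from Ne.symm hii)]

theorem pvS2_pvS2 (L : List (List Int)) {i : Nat} (j : Nat) (a b : Int)
    (hi : i < L.length) :
    pvS2 (pvS2 L i j a) i j b = pvS2 L i j b := by
  simp [pvS2, List.getD_eq_getElem?_getD, List.getElem?_set, hi, List.set_set]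

theorem pvS2_TBL (grid : List (List Int)) (done : List (Nat × Nat)) {i j : Nat}
    (hi : i < grid.length) (hj : j < grid.length) :
    pvS2 (TBL grid done) i j (lenP grid (i, j)) = TBL grid (done ++ [(i, j)]) := by
  apply List.ext_getElem
  · simp [pvS2, TBL]
  · intro i' h1 h2
    unfold pvS2
    rw [List.getElem_set]
    by_cases hii : i = i'
    · subst hii
      rw [if_pos rfl, TBL_row grid done hi]
      simp only [TBL, List.getElem_map, List.getElem_range]
      apply List.ext_getElem
      · simp
      · intro j' hj1 hj2
        rw [List.getElem_set]
        simp only [List.getElem_map, List.getElem_range]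
        by_cases hjj : j = j'
        · subst hjj
          simp
        · have hne : ((i, j') : Nat × Nat) ≠ (i, j) := by
            intro h
            exact hjj (congrArg Prod.snd h).symm
          simp [List.mem_append, hne, hjj]
    · rw [if_neg hii]
      simp only [TBL, List.getElem_map, List.getElem_range]
      apply List.map_congr_left
      intro j' _
      have hne : ((i', j') : Nat × Nat) ≠ (i, j) := by
        intro h
        exact hii (congrArg Prod.fst h).symm
      simp [List.mem_append, hne]

theorem MD_nil (grid : List (List Int)) : MD grid [] = 0 := by simp [MD]

theorem TD_nil (grid : List (List Int)) : TD grid [] = none := by simp [TD, MD]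

theorem TBL_nil (grid : List (List Int)) :
    TBL grid [] = (List.range grid.length).map
      (fun _ => (List.range grid.length).map (fun _ => (0 : Int))) := by
  simp [TBL]

theorem MD_append (grid : List (List Int)) (done : List (Nat × Nat)) (c : Nat × Nat) :
    MD grid (done ++ [c]) = max (MD grid done) (lenP grid c) := by
  simp [MD, List.foldl_append]

theorem MD_nonneg (grid : List (List Int)) (done : List (Nat × Nat)) : 0 ≤ MD grid done :=
  (PySem.List.le_foldl_max (done.map (lenP grid)) 0).1

theorem MD_le (grid : List (List Int)) {done : List (Nat × Nat)} {p : Nat × Nat}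
    (hp : p ∈ done) : lenP grid p ≤ MD grid done :=
  (PySem.List.le_foldl_max (done.map (lenP grid)) 0).2 _ (List.mem_map_of_mem hp)

theorem MD_attained (grid : List (List Int)) {done : List (Nat × Nat)}
    (h : MD grid done ≠ 0) : ∃ p ∈ done, lenP grid p = MD grid done := by
  rcases PySem.List.foldl_max_mem (done.map (lenP grid)) 0 with h0 | hm
  · exact absurd h0 (by simpa [MD] using h)
  · rcases List.mem_map.1 hm with ⟨p, hp, he⟩
    exact ⟨p, hp, he⟩

theorem TD_append (grid : List (List Int)) (done : List (Nat × Nat)) (c : Nat × Nat) :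
    TD grid (done ++ [c]) =
      if MD grid done < lenP grid c then some c else TD grid done := by
  by_cases hlt : MD grid done < lenP grid c
  · have hpos : 0 < lenP grid c := lt_of_le_of_lt (MD_nonneg grid done) hlt
    have hM : MD grid (done ++ [c]) = lenP grid c := by
      rw [MD_append]; omega
    have hnone : done.find? (fun p => lenP grid p == MD grid (done ++ [c])) = none := by
      apply List.find?_eq_none.2
      intro p hp
      have := MD_le grid hp
      simp only [beq_iff_eq, decide_eq_true_eq, hM]
      omega
    rw [TD, if_neg (by omega), List.find?_append, hnone, Option.none_or, if_pos hlt]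
    simp [hM]
  · have hM : MD grid (done ++ [c]) = MD grid done := by rw [MD_append]; omega
    by_cases h0 : MD grid done = 0
    · have hc0 : lenP grid c = 0 := by
        have := lenSnake_nonneg grid c.1 c.2
        simp only [lenP] at *
        omega
      simp [TD, hM, h0, hc0]
    · have ⟨q, hq, hqe⟩ := MD_attained grid h0
      have hsome : (done.find? (fun p => lenP grid p == MD grid done)).isSome := by
        rw [List.find?_isSome]
        exact ⟨q, hq, by simp [hqe]⟩
      rcases Option.isSome_iff_exists.1 hsome with ⟨r, hr⟩
      rw [TD, hM, if_neg h0, List.find?_append, hr, if_neg hlt, TD, if_neg h0, hr]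
      simp

theorem TBL_row_len (grid : List (List Int)) (done : List (Nat × Nat)) {i : Nat}
    (hi : i < grid.length) : ((TBL grid done).getD i []).length = grid.length := by
  rw [TBL_row grid done hi]; simp

theorem TBL_append_zero (grid : List (List Int)) (done : List (Nat × Nat)) {c : Nat × Nat}
    (h : lenP grid c = 0) : TBL grid (done ++ [c]) = TBL grid done := by
  unfold TBL
  apply List.map_congr_left
  intro i _
  apply List.map_congr_left
  intro j _
  by_cases hc : ((i, j) : Nat × Nat) = c
  · subst hc
    simp [h]
  · simp [List.mem_append, hc]

theorem cell_step (grid : List (List Int)) (done : List (Nat × Nat)) {i j : Nat}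
    (hi : i < grid.length) (hj : j < grid.length)
    (hnew : ((i, j) : Nat × Nat) ∉ done)
    (hup : 1 ≤ i → ((i-1, j) : Nat × Nat) ∈ done)
    (hleft : 1 ≤ j → ((i, j-1) : Nat × Nat) ∈ done) :
    pvCellA grid (TBL grid done, MD grid done, TD grid done) i j =
      (TBL grid (done ++ [(i, j)]), MD grid (done ++ [(i, j)]), TD grid (done ++ [(i, j)])) := by
  have hrl : ((TBL grid done).getD i []).length = grid.length := TBL_row_len grid done hi
  have htl : (TBL grid done).length = grid.length := TBL_length grid done
  have hvix : pvG2 (TBL grid done) i j = 0 := by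
    rw [pvG2_TBL grid done hi hj, if_neg hnew]
  have hveq := lenSnake_eq grid i j
  have hv0 := lenSnake_nonneg grid i j
  have hm0 := MD_nonneg grid done
  rw [TD_append, MD_append]
  by_cases h1 : 1 ≤ i ∧ (pvG2 grid (i-1) j - pvG2 grid i j).natAbs = 1 <;>
    by_cases h2 : 1 ≤ j ∧ (pvG2 grid i (j-1) - pvG2 grid i j).natAbs = 1
  · -- both branches fire
    have hu := hup h1.1
    have hl := hleft h2.1
    have hrt : pvG2 (TBL grid done) (i-1) j = lenSnake grid (i-1) j := by
      rw [pvG2_TBL grid done (by omega) hj, if_pos hu]; rfl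
    have hrle : pvG2 (TBL grid done) i (j-1) = lenSnake grid i (j-1) := by
      rw [pvG2_TBL grid done hi (by omega), if_pos hl]; rfl
    have hvv : lenP grid (i, j) =
        max (lenSnake grid (i-1) j + 1) (lenSnake grid i (j-1) + 1) := by
      rw [lenP, hveq]
      simp [h1, h2]
    have hit : i < (TBL grid done).length := htl ▸ hi
    have hjr : j < ((TBL grid done).getD i []).length := hrl ▸ hj
    have hne : ((i, j-1) : Nat × Nat) ≠ (i, j) := by
      intro h
      have := congrArg Prod.snd h
      simp at this
      omega
    have e1 : pvG2 (pvS2 (TBL grid done) i j (lenSnake grid (i-1) j + 1)) i j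
        = lenSnake grid (i-1) j + 1 := pvG2_pvS2_self _ _ hit hjr
    have e2 : pvG2 (pvS2 (TBL grid done) i j (lenSnake grid (i-1) j + 1)) i (j-1)
        = lenSnake grid i (j-1) := by
      rw [pvG2_pvS2_ne _ _ hne, hrle]
    have e3 : pvS2 (pvS2 (TBL grid done) i j (lenSnake grid (i-1) j + 1)) i j
          (max (lenSnake grid (i-1) j + 1) (lenSnake grid i (j-1) + 1))
        = TBL grid (done ++ [(i, j)]) := by
      rw [pvS2_pvS2 _ j _ _ hit, ← hvv, pvS2_TBL grid done hi hj]
    have e4 : pvG2 (TBL grid (done ++ [(i, j)])) i j = lenP grid (i, j) := by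
      rw [pvG2_TBL grid _ hi hj, if_pos (by simp)]
    by_cases hmt : MD grid done < lenSnake grid (i-1) j + 1 <;>
      by_cases hmv : MD grid done < lenP grid (i, j) <;>
        simp only [pvCellA, if_pos h1, if_pos h2, hrt, hrle, e1, e2, e3, e4,
          hmt, hmv, if_true, if_false] <;>
          (try split_ifs) <;>
            (simp only [Prod.mk.injEq] <;>
            and_intros <;>
              first
              | trivial
              | rfl
              | omega
              | ((try split_ifs) <;> first | trivial | rfl | omega))
  · -- only the top branch fires
    have hu := hup h1.1
    have hrt : pvG2 (TBL grid done) (i-1) j = lenSnake grid (i-1) j := by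
      rw [pvG2_TBL grid done (by omega) hj, if_pos hu]; rfl
    have hvv : lenP grid (i, j) = lenSnake grid (i-1) j + 1 := by
      rw [lenP, hveq]
      simp [h1, h2]
    have hit : i < (TBL grid done).length := htl ▸ hi
    have hjr : j < ((TBL grid done).getD i []).length := hrl ▸ hj
    have e3 : pvS2 (TBL grid done) i j (lenSnake grid (i-1) j + 1)
        = TBL grid (done ++ [(i, j)]) := by
      rw [← hvv, pvS2_TBL grid done hi hj]
    have e4 : pvG2 (TBL grid (done ++ [(i, j)])) i j = lenP grid (i, j) := by
      rw [pvG2_TBL grid _ hi hj, if_pos (by simp)]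
    by_cases hmv : MD grid done < lenP grid (i, j) <;>
      simp only [pvCellA, if_pos h1, if_neg h2, hrt, e3, e4, hmv, if_true, if_false] <;>
        (simp only [Prod.mk.injEq] <;>
            and_intros <;>
              first
              | trivial
              | rfl
              | omega
              | ((try split_ifs) <;> first | trivial | rfl | omega))
  · -- only the left branch fires
    have hl := hleft h2.1
    have hrle : pvG2 (TBL grid done) i (j-1) = lenSnake grid i (j-1) := by
      rw [pvG2_TBL grid done hi (by omega), if_pos hl]; rfl
    have hvv : lenP grid (i, j) = max 0 (lenSnake grid i (j-1) + 1) := by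
      rw [lenP, hveq]
      simp [h1, h2]
    have e3 : pvS2 (TBL grid done) i j (max 0 (lenSnake grid i (j-1) + 1))
        = TBL grid (done ++ [(i, j)]) := by
      rw [← hvv, pvS2_TBL grid done hi hj]
    have e4 : pvG2 (TBL grid (done ++ [(i, j)])) i j = lenP grid (i, j) := by
      rw [pvG2_TBL grid _ hi hj, if_pos (by simp)]
    by_cases hmv : MD grid done < lenP grid (i, j) <;>
      simp only [pvCellA, if_neg h1, if_pos h2, hvix, hrle, e3, e4, hmv, if_true, if_false] <;>
        (simp only [Prod.mk.injEq] <;>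
            and_intros <;>
              first
              | trivial
              | rfl
              | omega
              | ((try split_ifs) <;> first | trivial | rfl | omega))
  · -- neither branch fires
    have hv : lenP grid (i, j) = 0 := by
      rw [lenP, hveq]
      simp [h1, h2]
    simp only [pvCellA, if_neg h1, if_neg h2]
    rw [TBL_append_zero grid done hv, hv]
    have : max (MD grid done) 0 = MD grid done := by omega
    rw [this, if_neg (by omega)]

def rowPre (i j : Nat) : List (Nat × Nat) := (List.range j).map (fun j' => (i, j'))

def pre (n i : Nat) : List (Nat × Nat) := (List.range i).flatMap (fun i' => rowPre i' n)

theorem mem_rowPre {i j : Nat} {p : Nat × Nat} :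
    p ∈ rowPre i j ↔ p.1 = i ∧ p.2 < j := by
  cases p
  simp [rowPre, eq_comm, and_comm]

theorem mem_pre {n i : Nat} {p : Nat × Nat} :
    p ∈ pre n i ↔ p.1 < i ∧ p.2 < n := by
  cases p
  simp [pre, mem_rowPre]

theorem rowPre_succ (i j : Nat) : rowPre i (j+1) = rowPre i j ++ [(i, j)] := by
  simp [rowPre, List.range_succ]

theorem pre_succ (n i : Nat) : pre n (i+1) = pre n i ++ rowPre i n := by
  simp [pre, List.range_succ]

theorem inner_fold (grid : List (List Int)) {i : Nat} (hi : i < grid.length) :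
    ∀ j, j ≤ grid.length →
      (List.range j).foldl (fun σ j' => pvCellA grid σ i j')
          (TBL grid (pre grid.length i), MD grid (pre grid.length i), TD grid (pre grid.length i))
        = (TBL grid (pre grid.length i ++ rowPre i j),
           MD grid (pre grid.length i ++ rowPre i j),
           TD grid (pre grid.length i ++ rowPre i j)) := by
  intro j
  induction j with
  | zero => simp [rowPre]
  | succ j ih =>
    intro hj
    rw [List.range_succ, List.foldl_append, ih (by omega)]
    have hcell := cell_step grid (pre grid.length i ++ rowPre i j) (i := i) (j := j) hi (by omega)
      (by
        simp [List.mem_append, mem_pre, mem_rowPre]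
        try omega)
      (fun h1 => by
        simp [List.mem_append, mem_pre, mem_rowPre]
        try omega)
      (fun h2 => by
        simp [List.mem_append, mem_pre, mem_rowPre]
        try omega)
    simp only [List.foldl_cons, List.foldl_nil, hcell, rowPre_succ, List.append_assoc]

theorem outer_fold (grid : List (List Int)) :
    ∀ i, i ≤ grid.length →
      (List.range i).foldl
          (fun σ i' => (List.range grid.length).foldl (fun σ j => pvCellA grid σ i' j) σ)
          (TBL grid (pre grid.length 0), MD grid (pre grid.length 0), TD grid (pre grid.length 0))
        = (TBL grid (pre grid.length i), MD grid (pre grid.length i), TD grid (pre grid.length i)) := by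
  intro i
  induction i with
  | zero => simp
  | succ i ih =>
    intro hi
    rw [List.range_succ, List.foldl_append, ih (by omega), List.foldl_cons, List.foldl_nil,
      inner_fold grid (by omega) grid.length (le_refl _), ← pre_succ]

theorem walkB_cons (grid : List (List Int)) (f i j : Nat) :
    pvWalkB grid f i j = ((i : Int), (j : Int)) :: (pvWalkB grid f i j).tail := by
  cases f <;> rfl

theorem pvG2_all (grid : List (List Int)) {i j : Nat}
    (hi : i < grid.length) (hj : j < grid.length) :
    pvG2 (TBL grid (pre grid.length grid.length)) i j = lenSnake grid i j := by
  rw [pvG2_TBL grid _ hi hj, if_pos (mem_pre.2 ⟨hi, hj⟩)]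
  rfl

theorem walk_eq (grid : List (List Int)) :
    ∀ (f i j : Nat) (acc : List (Int × Int)), i < grid.length → j < grid.length →
      lenSnake grid i j = (f : Int) →
      pvWalkA grid (TBL grid (pre grid.length grid.length)) f i j acc
        = acc ++ (pvWalkB grid f i j).tail := by
  intro f
  induction f with
  | zero => intro i j acc _ _ _; simp [pvWalkA, pvWalkB]
  | succ f ih =>
    intro i j acc hi hj hv
    have r0 := pvG2_all grid hi hj
    simp only [pvWalkA, pvWalkB, r0]
    rw [if_pos (by omega)]
    by_cases hA : 1 ≤ i ∧ lenSnake grid i j - lenSnake grid (i-1) j = 1 ∧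
        (pvG2 grid (i-1) j - pvG2 grid i j).natAbs = 1
    · have r1 := pvG2_all grid (show i - 1 < grid.length by omega) hj
      rw [if_pos (by rw [r1]; exact hA), if_pos hA, ih (i-1) j _ (by omega) hj (by omega),
        walkB_cons grid f (i-1) j]
      simp
    · have hA' : ¬ (1 ≤ i ∧ lenSnake grid i j - pvG2 (TBL grid (pre grid.length grid.length)) (i-1) j = 1 ∧
          (pvG2 grid (i-1) j - pvG2 grid i j).natAbs = 1) := by
        intro hc
        by_cases h1 : 1 ≤ i
        · have r1 := pvG2_all grid (show i - 1 < grid.length by omega) hj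
          rw [r1] at hc
          exact hA hc
        · exact h1 hc.1
      rw [if_neg hA', if_neg hA]
      by_cases hB : 1 ≤ j ∧ lenSnake grid i j - lenSnake grid i (j-1) = 1 ∧
          (pvG2 grid i (j-1) - pvG2 grid i j).natAbs = 1
      · have r2 := pvG2_all grid hi (show j - 1 < grid.length by omega)
        rw [if_pos (by rw [r2]; exact hB), if_pos hB, ih i (j-1) _ hi (by omega) (by omega),
          walkB_cons grid f i (j-1)]
        simp
      · have hB' : ¬ (1 ≤ j ∧ lenSnake grid i j - pvG2 (TBL grid (pre grid.length grid.length)) i (j-1) = 1 ∧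
            (pvG2 grid i (j-1) - pvG2 grid i j).natAbs = 1) := by
          intro hc
          by_cases h2 : 1 ≤ j
          · have r2 := pvG2_all grid hi (show j - 1 < grid.length by omega)
            rw [r2] at hc
            exact hB hc
          · exact h2 hc.1
        rw [if_neg hB', if_neg hB]
        simp

theorem max?_id_nonneg {xs : List Int} (hne : xs ≠ []) (h : ∀ x ∈ xs, 0 ≤ x) :
    PySem.List.max? xs (fun v => v) = some (xs.foldl max 0) := by
  cases xs with
  | nil => exact absurd rfl hne
  | cons x t =>
    rw [PySem.List.max?_id_cons, List.foldl_cons, max_eq_right (h x (by simp))]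

theorem main_eq (grid : List (List Int))
    (hpre : (∀ r ∈ grid, grid.length ≤ r.length) ∧
      (grid ≠ [] → ∃ i < grid.length, ∃ j < grid.length,
        (1 ≤ i ∧ (pvG2 grid (i-1) j - pvG2 grid i j).natAbs = 1) ∨
        (1 ≤ j ∧ (pvG2 grid i (j-1) - pvG2 grid i j).natAbs = 1))) :
    findMaxLengthSnakeSequence grid = findMaxLengthSnakeSequence_alt grid := by
  by_cases hgrid : grid = []
  · simp [findMaxLengthSnakeSequence, findMaxLengthSnakeSequence_alt, hgrid]
  · have hn : 1 ≤ grid.length := List.length_pos_iff.2 hgrid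
    -- the cells list of the B port is `(pre grid.length grid.length)`
    have hcells : (List.range grid.length).flatMap (fun i => (List.range grid.length).map (fun j => (i, j))) = (pre grid.length grid.length) := by
      simp [pre, rowPre]
    -- the A fold computes the spec state
    have hfold : (List.range grid.length).foldl
        (fun σ i => (List.range grid.length).foldl (fun σ j => pvCellA grid σ i j) σ)
        ((List.range grid.length).map (fun _ => (List.range grid.length).map (fun _ => (0:Int))), 0, none)
        = (TBL grid (pre grid.length grid.length), MD grid (pre grid.length grid.length), TD grid (pre grid.length grid.length)) := by
      have h0 : ((List.range grid.length).map (fun _ => (List.range grid.length).map (fun _ => (0:Int))),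
          (0 : Int), (none : Option (Nat × Nat)))
          = (TBL grid (pre grid.length 0), MD grid (pre grid.length 0), TD grid (pre grid.length 0)) := by
        have : pre grid.length 0 = [] := rfl
        rw [this, TBL_nil, MD_nil, TD_nil]
      rw [h0]
      exact outer_fold grid grid.length (le_refl _)
    -- positivity of the maximum
    rcases hpre.2 hgrid with ⟨i, hi, j, hj, hstep⟩
    have hpos : 0 < MD grid (pre grid.length grid.length) := by
      have h1 : 1 ≤ lenSnake grid i j := by
        have n1 := lenSnake_nonneg grid (i-1) j
        have n2 := lenSnake_nonneg grid i (j-1)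
        rw [lenSnake_eq]
        rcases hstep with hc | hc
        · rw [if_pos hc]
          split_ifs <;> simp <;> omega
        · rw [if_pos hc]
          split_ifs <;> simp <;> omega
      have h2 : lenP grid (i, j) ≤ MD grid (pre grid.length grid.length) := MD_le grid (mem_pre.2 ⟨hi, hj⟩)
      have : lenP grid (i, j) = lenSnake grid i j := rfl
      omega
    -- the B port's max is MD
    have hvals : ((List.range grid.length).flatMap (fun i => (List.range grid.length).map (fun j => (i, j)))).map
        (fun p => lenSnake grid p.1 p.2) = (pre grid.length grid.length).map (lenP grid) := by
      rw [hcells]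
      rfl
    have hne : (pre grid.length grid.length).map (lenP grid) ≠ [] := by
      have : ((0, 0) : Nat × Nat) ∈ (pre grid.length grid.length) := mem_pre.2 ⟨by omega, by omega⟩
      intro hnil
      rw [List.map_eq_nil_iff] at hnil
      rw [hnil] at this
      simp at this
    have hmax : PySem.List.max? ((pre grid.length grid.length).map (lenP grid)) (fun v => v) = some (MD grid (pre grid.length grid.length)) :=
      max?_id_nonneg hne (by
        intro x hx
        rcases List.mem_map.1 hx with ⟨p, _, hp⟩
        rw [← hp]
        exact lenSnake_nonneg grid p.1 p.2)
    -- the tail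
    have hTD : TD grid (pre grid.length grid.length) = (pre grid.length grid.length).find? (fun p => lenP grid p == MD grid (pre grid.length grid.length)) := by
      rw [TD, if_neg (by omega)]
    have hfindsome : ((pre grid.length grid.length).find? (fun p => lenP grid p == MD grid (pre grid.length grid.length))).isSome := by
      rw [List.find?_isSome]
      rcases MD_attained grid (done := (pre grid.length grid.length)) (by omega) with ⟨q, hq, hqe⟩
      exact ⟨q, hq, by simp [hqe]⟩
    rcases Option.isSome_iff_exists.1 hfindsome with ⟨⟨ti, tj⟩, hfind⟩
    have htmem : ((ti, tj) : Nat × Nat) ∈ (pre grid.length grid.length) := List.mem_of_find?_eq_some hfind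
    have hti : ti < grid.length := (mem_pre.1 htmem).1
    have htj : tj < grid.length := (mem_pre.1 htmem).2
    -- assemble
    rw [findMaxLengthSnakeSequence, findMaxLengthSnakeSequence_alt, if_neg hgrid, if_neg hgrid]
    have hmax' : PySem.List.max?
        ((pre grid.length grid.length).map (fun p => lenSnake grid p.1 p.2)) (fun v => v)
        = some (MD grid (pre grid.length grid.length)) := hmax
    have hfind' : (pre grid.length grid.length).find?
        (fun p => lenSnake grid p.1 p.2 == MD grid (pre grid.length grid.length))
        = some (ti, tj) := hfind
    simp only [hfold, hcells, hmax', hfind', hTD, hfind]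
    have hg : pvG2 (TBL grid (pre grid.length grid.length)) ti tj = lenSnake grid ti tj := pvG2_all grid hti htj
    rw [hg]
    have hfuel : lenSnake grid ti tj = ((lenSnake grid ti tj).toNat : Int) :=
      (Int.toNat_of_nonneg (lenSnake_nonneg grid ti tj)).symm
    rw [walk_eq grid _ ti tj _ hti htj hfuel, walkB_cons grid _ ti tj]
    simp

-- ===== VERDICT (by name: the statement is the Claim_ definition above) =====
theorem findMaxLengthSnakeSequence_spec : Claim_equal_findMaxLengthSnakeSequence := by
  intro grid _ hpre
  exact main_eq grid hpre
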